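-- pv_equiv track=rewrite | github.com/jwtowner/lug | unicode/makeunicode.py | get_record_size
-- ===== SOURCE A (Python) =====
-- def get_type_size(table):
--         type_size = [("std::uint_least8_t", 1), ("std::uint_least16_t", 2), ("std::uint_least32_t", 4),
--                      ("std::int_least8_t", 1), ("std::int_least16_t", 2), ("std::int_least32_t", 4)]
--         limits = [(0, 255), (0, 65535), (0, 4294967295),
--                   (-128, 127), (-32768, 32767), (-2147483648, 2147483647)]
--         minval = min(table)
--         maxval = max(table)
--         for num, (minlimit, maxlimit) in enumerate(limits):
--                 if minlimit <= minval and maxval <= maxlimit: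
--                         return type_size[num]
--         else:
--                 raise OverflowError("Too large to fit into C++ types [%d, %d]" % (minval, maxval))
--
-- def get_record_size(records):
--         size = 0
--         for i in range(len(records[0])):
--                 record_slice = [record[i] for record in records]
--                 slice_type, slice_size = get_type_size(record_slice)
--                 # add padding: round up to the nearest power of slice_size
--                 size = (size + slice_size - 1) & -slice_size
--                 size += slice_size
--         # round up to the first item of the next structure in array
--         record_slice = [record[0] for record in records]
--         slice_type, slice_size = get_type_size(record_slice)
--         size = (size + slice_size - 1) & -slice_size
--         return size
-- ===== SOURCE B (Python) =====
-- def get_record_size(records):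
--     # Single row-major pass: per column keep (seen-negative flag, max unsigned
--     # width, max signed width) of the elements seen so far; 8 marks "fits no type".
--     ncols = len(records[0])
--     widths = [(False, 1, 1)] * ncols
--     for record in records:
--         for i in range(ncols):
--             x = record[i]
--             neg, wu, ws = widths[i]
--             widths[i] = (neg or x < 0,
--                          max(wu, 1 if x <= 255 else 2 if x <= 65535 else 4 if x <= 4294967295 else 8),
--                          max(ws, 1 if -128 <= x <= 127 else 2 if -32768 <= x <= 32767 else 4 if -2147483648 <= x <= 2147483647 else 8))
--     sizes = [ws if neg else wu for neg, wu, ws in widths]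
--     if any(s > 4 for s in sizes):
--         raise OverflowError("column too large to fit into C++ types")
--     # aligned layout via modular arithmetic instead of bit masking
--     total = 0
--     for s in sizes:
--         total += (-total) % s + s
--     return total + (-total) % sizes[0]
-- ===== Notes on version B (the rewrite author's own statement) =====
-- stated objective: alternative
-- what changed: B transposes the traversal: one row-major pass maintains per-column (negative-flag, max unsigned width, max signed width) accumulators instead of A's column-major slices with min/max and a limits-table lookup, and the aligned total is folded with Python modular arithmetic ((-total) % s) instead of A's bit masking ((size+s-1) & -s).
import Mathlib
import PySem

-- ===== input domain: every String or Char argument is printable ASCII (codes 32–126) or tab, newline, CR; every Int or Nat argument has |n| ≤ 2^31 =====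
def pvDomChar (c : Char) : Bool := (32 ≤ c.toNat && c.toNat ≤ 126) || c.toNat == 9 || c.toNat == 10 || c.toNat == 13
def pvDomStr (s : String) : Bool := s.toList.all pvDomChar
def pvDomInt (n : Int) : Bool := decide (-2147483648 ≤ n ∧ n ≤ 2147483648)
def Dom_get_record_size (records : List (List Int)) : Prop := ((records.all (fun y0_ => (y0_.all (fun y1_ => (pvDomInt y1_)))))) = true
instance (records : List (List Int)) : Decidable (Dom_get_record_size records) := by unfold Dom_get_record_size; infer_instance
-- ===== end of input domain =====

-- B transposes A's traversal: a single row-major pass keeping per-column width accumulators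
-- (instead of A's column slices with min/max and a limits-table lookup), and modular-arithmetic
-- alignment instead of bit masking; objective: alternative decomposition (same cost).

-- ===== PORT A =====
-- A raises inside get_type_size (OverflowError, ValueError of min([])) and on missing indices
-- (IndexError); those inputs are excluded by Pre_; the `.getD`/`none => 0` defaults are unreachable inside Pre_.
def pvGtsFind (type_size : List (String × Int)) (pairs : List (Int × (Int × Int))) (minval maxval : Int) : Option (String × Int) :=
  match pairs with
  | [] => none
  | (num, (mn, mx)) :: rest =>
    if mn ≤ minval ∧ maxval ≤ mx then PySem.List.pyGet? type_size num
    else pvGtsFind type_size rest minval maxval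

def get_type_size (table : List Int) : Option (String × Int) :=
  let type_size : List (String × Int) :=
    [("std::uint_least8_t", 1), ("std::uint_least16_t", 2), ("std::uint_least32_t", 4),
     ("std::int_least8_t", 1), ("std::int_least16_t", 2), ("std::int_least32_t", 4)]
  let limits : List (Int × Int) :=
    [(0, 255), (0, 65535), (0, 4294967295),
     (-128, 127), (-32768, 32767), (-2147483648, 2147483647)]
  match PySem.List.min? table (fun y => y), PySem.List.max? table (fun y => y) with
  | some minval, some maxval => pvGtsFind type_size (PySem.List.enumerate limits) minval maxval
  | _, _ => none

def get_record_size (records : List (List Int)) : Int :=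
  let size : Int :=
    (PySem.List.pyRange 0 (((PySem.List.pyGet? records 0).getD []).length) 1).foldl
      (fun size i =>
        let record_slice := records.map (fun record => (PySem.List.pyGet? record i).getD 0)
        let slice_size := match get_type_size record_slice with | some (_, s) => s | none => 0
        (PySem.Int.band (size + slice_size - 1) (-slice_size)) + slice_size) 0
  let record_slice := records.map (fun record => (PySem.List.pyGet? record 0).getD 0)
  let slice_size := match get_type_size record_slice with | some (_, s) => s | none => 0
  PySem.Int.band (size + slice_size - 1) (-slice_size)

-- ===== PORT B =====
-- per-element widths (8 = fits no C++ type) and the per-column accumulator update of Source B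
def wuOf (x : Int) : Int :=
  if x ≤ 255 then 1 else if x ≤ 65535 then 2 else if x ≤ 4294967295 then 4 else 8
def wsOf (x : Int) : Int :=
  if -128 ≤ x ∧ x ≤ 127 then 1 else if -32768 ≤ x ∧ x ≤ 32767 then 2
  else if -2147483648 ≤ x ∧ x ≤ 2147483647 then 4 else 8
def wStep (w : Bool × Int × Int) (x : Int) : Bool × Int × Int :=
  (w.1 || decide (x < 0), max w.2.1 (wuOf x), max w.2.2 (wsOf x))

-- B's OverflowError (`any(s > 4)`) and the IndexError of `record[i]` / `sizes[0]` are outside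
-- Pre_; the `0` results / `.getD 0` defaults standing for them are unreachable inside Pre_.
def get_record_size_alt (records : List (List Int)) : Int :=
  let ncols := ((PySem.List.pyGet? records 0).getD []).length
  let widths : List (Bool × Int × Int) :=
    records.foldl
      (fun widths record =>
        (PySem.List.pyRange 0 ncols 1).foldl
          (fun widths i =>
            let x := (PySem.List.pyGet? record i).getD 0
            PySem.List.pySetD widths i (wStep (PySem.List.pyGetD widths i (false, 1, 1)) x))
          widths)
      (List.replicate ncols (false, 1, 1))
  let sizes : List Int := widths.map (fun w => if w.1 then w.2.2 else w.2.1)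
  if sizes.any (fun s => decide (4 < s)) then 0
  else
    let total : Int := sizes.foldl (fun total s => total + PySem.Int.mod (-total) s + s) 0
    total + PySem.Int.mod (-total) (PySem.List.pyGetD sizes 0 0)

-- ===== PRECONDITION & SPEC =====
-- Pre_ excludes exactly the inputs where A raises: empty records, empty first row,
-- rows shorter than the first row (IndexError), and a column fitting no C++ limit row (OverflowError).
def Pre_get_record_size (records : List (List Int)) : Prop :=
  records ≠ [] ∧ records.headD [] ≠ [] ∧
  (∀ r ∈ records, (records.headD []).length ≤ r.length) ∧
  ∀ i < (records.headD []).length,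
    (∀ r ∈ records, 0 ≤ r.getD i 0 ∧ r.getD i 0 ≤ 4294967295) ∨
    (∀ r ∈ records, -2147483648 ≤ r.getD i 0 ∧ r.getD i 0 ≤ 2147483647)
instance (records : List (List Int)) : Decidable (Pre_get_record_size records) := by
  unfold Pre_get_record_size; infer_instance
def pvWitness_get_record_size : List (List Int) := [[1, 2, 300], [4, -5, 6]]
def Spec_get_record_size (records : List (List Int)) (out : Int) : Prop := out = get_record_size_alt records
instance (records : List (List Int)) (out : Int) : Decidable (Spec_get_record_size records out) := by unfold Spec_get_record_size; infer_instance

-- ===== CLAIM (what is proved, stated in full; the proofs are below) =====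
def Claim_equal_get_record_size : Prop := ∀ (records : List (List Int)), Dom_get_record_size records → Pre_get_record_size records → Spec_get_record_size records (get_record_size records)

-- ===== LEMMAS AND PROOFS =====

-- B's per-column size, as the proofs read it off the accumulator
def colSizeB (col : List Int) : Int :=
  let w := col.foldl wStep (false, 1, 1)
  if w.1 then w.2.2 else w.2.1

-- the three accumulator components of B's fold, separated
theorem wStep_fold (col : List Int) (b : Bool) (u s : Int) :
    col.foldl wStep (b, u, s) =
      (b || col.any (fun x => decide (x < 0)),
       col.foldl (fun a x => max a (wuOf x)) u,
       col.foldl (fun a x => max a (wsOf x)) s) := by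
  induction col generalizing b u s with
  | nil => simp
  | cons c t ih => simp [wStep, ih, Bool.or_assoc]

theorem foldl_max_le_int (xs : List Int) (f : Int → Int) (init c : Int)
    (h0 : init ≤ c) (h : ∀ x ∈ xs, f x ≤ c) :
    xs.foldl (fun a x => max a (f x)) init ≤ c := by
  induction xs generalizing init with
  | nil => exact h0
  | cons y t ih =>
    exact ih _ (max_le h0 (h y (by simp))) (fun x hx => h x (by simp [hx]))

theorem wuOf_mono {x y : Int} (h : x ≤ y) : wuOf x ≤ wuOf y := by
  unfold wuOf; split_ifs <;> omega

theorem wsOf_le_max {lo hi x : Int} (h1 : lo ≤ x) (h2 : x ≤ hi) :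
    wsOf x ≤ max (wsOf lo) (wsOf hi) := by
  unfold wsOf; split_ifs <;> simp_all <;> omega

theorem one_le_wuOf (x : Int) : 1 ≤ wuOf x := by unfold wuOf; split_ifs <;> omega
theorem one_le_wsOf (x : Int) : 1 ≤ wsOf x := by unfold wsOf; split_ifs <;> omega

theorem gts_val (col : List Int) (lo hi : Int)
    (hmin : PySem.List.min? col (fun y => y) = some lo)
    (hmax : PySem.List.max? col (fun y => y) = some hi) :
    (match get_type_size col with | some (_, s) => s | none => 0) =
    (if 0 ≤ lo ∧ hi ≤ 255 then 1 else if 0 ≤ lo ∧ hi ≤ 65535 then 2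
     else if 0 ≤ lo ∧ hi ≤ 4294967295 then 4 else if -128 ≤ lo ∧ hi ≤ 127 then 1
     else if -32768 ≤ lo ∧ hi ≤ 32767 then 2
     else if -2147483648 ≤ lo ∧ hi ≤ 2147483647 then 4 else (0 : Int)) := by
  unfold get_type_size
  rw [hmin, hmax]
  simp only [PySem.List.enumerate, pvGtsFind, PySem.List.pyGet?]
  norm_num [PySem.List.pyIdx?]
  split_ifs <;> simp_all <;> omega


theorem chain_signed (lo hi : Int) (h0 : lo < 0) (h1 : -2147483648 ≤ lo) (h2 : hi ≤ 2147483647) (h3 : lo ≤ hi) :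
    (if 0 ≤ lo ∧ hi ≤ 255 then 1 else if 0 ≤ lo ∧ hi ≤ 65535 then 2
     else if 0 ≤ lo ∧ hi ≤ 4294967295 then 4 else if -128 ≤ lo ∧ hi ≤ 127 then 1
     else if -32768 ≤ lo ∧ hi ≤ 32767 then 2
     else if -2147483648 ≤ lo ∧ hi ≤ 2147483647 then 4 else (0:Int)) = max (wsOf lo) (wsOf hi)
      ∧ (max (wsOf lo) (wsOf hi) = 1 ∨ max (wsOf lo) (wsOf hi) = 2 ∨ max (wsOf lo) (wsOf hi) = 4) := by
  rw [if_neg (by omega : ¬(0 ≤ lo ∧ hi ≤ 255)), if_neg (by omega : ¬(0 ≤ lo ∧ hi ≤ 65535)),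
      if_neg (by omega : ¬(0 ≤ lo ∧ hi ≤ 4294967295))]
  unfold wsOf
  split_ifs <;> constructor <;> omega

theorem chain_unsigned (lo hi : Int) (h0 : 0 ≤ lo) (h2 : hi ≤ 4294967295) (h3 : lo ≤ hi) :
    (if 0 ≤ lo ∧ hi ≤ 255 then 1 else if 0 ≤ lo ∧ hi ≤ 65535 then 2
     else if 0 ≤ lo ∧ hi ≤ 4294967295 then 4 else if -128 ≤ lo ∧ hi ≤ 127 then 1
     else if -32768 ≤ lo ∧ hi ≤ 32767 then 2
     else if -2147483648 ≤ lo ∧ hi ≤ 2147483647 then 4 else (0:Int)) = wuOf hi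
      ∧ (wuOf hi = 1 ∨ wuOf hi = 2 ∨ wuOf hi = 4) := by
  unfold wuOf
  split_ifs <;> constructor <;> omega



theorem col_size_eq (col : List Int) (hne : col ≠ [])
    (hpre : (∀ x ∈ col, 0 ≤ x ∧ x ≤ 4294967295) ∨
            (∀ x ∈ col, -2147483648 ≤ x ∧ x ≤ 2147483647)) :
    (match get_type_size col with | some (_, s) => s | none => 0) = colSizeB col ∧
    (colSizeB col = 1 ∨ colSizeB col = 2 ∨ colSizeB col = 4) := by
  obtain ⟨c, t, rfl⟩ : ∃ c t, col = c :: t := by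
    cases col with | nil => simp at hne | cons c t => exact ⟨c, t, rfl⟩
  have hmin := PySem.List.min?_id_cons (x := c) (t := t)
  have hmax := PySem.List.max?_id_cons (x := c) (t := t)
  set lo := t.foldl min c with hlo
  set hi := t.foldl max c with hhi
  have hlomem : lo ∈ c :: t := PySem.List.min?_mem hmin
  have hhimem : hi ∈ c :: t := PySem.List.max?_mem hmax
  have hlole : ∀ x ∈ c :: t, lo ≤ x := fun x hx => PySem.List.min?_isMin hmin x hx
  have hhile : ∀ x ∈ c :: t, x ≤ hi := fun x hx => PySem.List.max?_isMax hmax x hx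
  rw [gts_val _ lo hi hmin hmax]
  unfold colSizeB
  rw [wStep_fold]
  by_cases hneg : ∃ x ∈ c :: t, x < 0
  · obtain ⟨x, hx, hxneg⟩ := hneg
    have hany : (c :: t).any (fun x => decide (x < 0)) = true := by
      simp only [List.any_eq_true]; exact ⟨x, hx, by simpa using hxneg⟩
    have hlon : lo < 0 := lt_of_le_of_lt (hlole x hx) hxneg
    have hsr : ∀ y ∈ c :: t, -2147483648 ≤ y ∧ y ≤ 2147483647 := by
      rcases hpre with h | h
      · exact absurd (h x hx).1 (by omega)
      · exact h
    have hws : (c :: t).foldl (fun a x => max a (wsOf x)) 1 = max (wsOf lo) (wsOf hi) := by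
      apply le_antisymm
      · exact foldl_max_le_int _ _ _ _ (le_trans (one_le_wsOf lo) (le_max_left _ _))
          (fun y hy => wsOf_le_max (hlole y hy) (hhile y hy))
      · apply max_le
        · exact ((PySem.List.le_foldl_max_int (c :: t) wsOf 1).2 lo hlomem)
        · exact ((PySem.List.le_foldl_max_int (c :: t) wsOf 1).2 hi hhimem)
    simp only [hany, if_true, Bool.or_true, hws]
    have h1 := (hsr lo hlomem); have h2 := (hsr hi hhimem)
    have hlohi : lo ≤ hi := le_trans (hlole c (by simp)) (hhile c (by simp))
    exact chain_signed lo hi hlon h1.1 h2.2 hlohi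
  · push_neg at hneg
    have hany : (c :: t).any (fun x => decide (x < 0)) = false := by
      simp only [List.any_eq_false]; intro x hx; simpa using hneg x hx
    have hlon : 0 ≤ lo := hneg lo hlomem
    have hhir : hi ≤ 4294967295 := by
      rcases hpre with h | h
      · exact (h hi hhimem).2
      · exact le_trans (h hi hhimem).2 (by norm_num)
    have hwu : (c :: t).foldl (fun a x => max a (wuOf x)) 1 = wuOf hi := by
      apply le_antisymm
      · exact foldl_max_le_int _ _ _ _ (one_le_wuOf hi)
          (fun y hy => wuOf_mono (hhile y hy))
      · exact ((PySem.List.le_foldl_max_int (c :: t) wuOf 1).2 hi hhimem)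
    simp only [hany, Bool.or_false, hwu]
    have hlohi : lo ≤ hi := le_trans (hlole c (by simp)) (hhile c (by simp))
    exact chain_unsigned lo hi hlon hhir hlohi

-- alignment identity: bit masking = Python modular rounding, for s ∈ {1,2,4} and 0 ≤ t
theorem band_align (t s : Int) (ht : 0 ≤ t) (hs : s = 1 ∨ s = 2 ∨ s = 4) :
    PySem.Int.band (t + s - 1) (-s) = t + PySem.Int.mod (-t) s := by
  rcases hs with rfl | rfl | rfl
  · rw [PySem.Int.mod_eq_emod_of_pos (by norm_num)]
    simp [PySem.Int.band_neg_one]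
  · rw [PySem.Int.mod_eq_emod_of_pos (by norm_num)]
    simp only [PySem.Int.band, if_pos (by omega : (0:Int) ≤ t + 2 - 1), if_neg (by omega : ¬ (0:Int) ≤ -2)]
    rw [show (-(-2:Int) - 1).toNat = 1 from rfl, Nat.and_one_is_mod]
    omega
  · rw [PySem.Int.mod_eq_emod_of_pos (by norm_num)]
    simp only [PySem.Int.band, if_pos (by omega : (0:Int) ≤ t + 4 - 1), if_neg (by omega : ¬ (0:Int) ≤ -4)]
    rw [show (-(-4:Int) - 1).toNat = 3 from rfl]
    rw [show (3:Nat) = 2^2 - 1 from rfl, Nat.and_two_pow_sub_one_eq_mod]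
    omega

-- one row of B's inner index loop, over the range segment [a, ncols)
theorem inner_seg (record : List Int) (ncols : Nat) (j : Nat) :
    ∀ (a : Nat) (w : List (Bool × Int × Int)), a + j = ncols → w.length = ncols →
    (((PySem.List.pyRange (a : Int) (ncols : Int) 1).foldl
        (fun widths i =>
          PySem.List.pySetD widths i
            (wStep (PySem.List.pyGetD widths i (false, 1, 1)) ((PySem.List.pyGet? record i).getD 0)))
        w).length = ncols ∧
     ∀ k, k < ncols →
      ((PySem.List.pyRange (a : Int) (ncols : Int) 1).foldl
        (fun widths i =>
          PySem.List.pySetD widths i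
            (wStep (PySem.List.pyGetD widths i (false, 1, 1)) ((PySem.List.pyGet? record i).getD 0)))
        w).getD k (false, 1, 1) =
      if a ≤ k then wStep (w.getD k (false, 1, 1)) ((PySem.List.pyGet? record (k : Int)).getD 0)
      else w.getD k (false, 1, 1)) := by
  induction j with
  | zero =>
    intro a w ha hw
    rw [PySem.List.pyRange_one_eq_nil (by omega)]
    simp only [List.foldl_nil]
    exact ⟨hw, fun k hk => by rw [if_neg (by omega)]⟩
  | succ n ih =>
    intro a w ha hw
    rw [PySem.List.pyRange_one_cons (by exact_mod_cast (by omega : (a:Int) < ncols))]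
    simp only [List.foldl_cons]
    have hset : (PySem.List.pySetD w (a : Int)
        (wStep (PySem.List.pyGetD w (a : Int) (false, 1, 1)) ((PySem.List.pyGet? record (a : Int)).getD 0)))
        = w.set a (wStep (w.getD a (false, 1, 1)) ((PySem.List.pyGet? record (a : Int)).getD 0)) := by
      simp [PySem.List.pySetD_natCast, PySem.List.pyGetD_natCast]
    have hlen' : (w.set a (wStep (w.getD a (false, 1, 1)) ((PySem.List.pyGet? record (a : Int)).getD 0))).length = ncols := by
      simpa using hw
    have hcast : ((a : Int) + 1) = ((a + 1 : Nat) : Int) := by push_cast; ring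
    rw [hset, hcast]
    obtain ⟨ihlen, ihget⟩ := ih (a + 1) _ (by omega) hlen'
    refine ⟨ihlen, fun k hk => ?_⟩
    rw [ihget k hk]
    by_cases hka : a + 1 ≤ k
    · rw [if_pos hka, if_pos (by omega)]
      congr 1
      rw [List.getD_eq_getElem?_getD, List.getElem?_set_ne (by omega), ← List.getD_eq_getElem?_getD]
    · by_cases hke : k = a
      · subst hke
        rw [if_neg hka, if_pos (by omega)]
        rw [List.getD_eq_getElem?_getD, List.getElem?_set_self (by omega)]
        simp
      · rw [if_neg hka, if_neg (by omega)]
        rw [List.getD_eq_getElem?_getD, List.getElem?_set_ne (by omega), ← List.getD_eq_getElem?_getD]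

theorem widths_spec (records : List (List Int)) (ncols : Nat) :
    ∀ (w0 : List (Bool × Int × Int)), w0.length = ncols →
    (records.foldl
      (fun widths record =>
        (PySem.List.pyRange 0 (ncols : Int) 1).foldl
          (fun widths i =>
            PySem.List.pySetD widths i
              (wStep (PySem.List.pyGetD widths i (false, 1, 1)) ((PySem.List.pyGet? record i).getD 0)))
          widths)
      w0).length = ncols ∧
    ∀ k, k < ncols →
      (records.foldl
        (fun widths record =>
          (PySem.List.pyRange 0 (ncols : Int) 1).foldl
            (fun widths i =>
              PySem.List.pySetD widths i
                (wStep (PySem.List.pyGetD widths i (false, 1, 1)) ((PySem.List.pyGet? record i).getD 0)))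
            widths)
        w0).getD k (false, 1, 1) =
      (records.map (fun r => (PySem.List.pyGet? r (k : Int)).getD 0)).foldl wStep (w0.getD k (false, 1, 1)) := by
  induction records with
  | nil => intro w0 h; exact ⟨h, fun k hk => by simp⟩
  | cons r rs ih =>
    intro w0 h
    simp only [List.foldl_cons, List.map_cons]
    obtain ⟨slen, sget⟩ := inner_seg r ncols ncols 0 w0 (by omega) h
    simp only [Nat.cast_zero] at slen sget
    obtain ⟨ilen, iget⟩ := ih _ slen
    refine ⟨ilen, fun k hk => ?_⟩
    rw [iget k hk, sget k hk, if_pos (Nat.zero_le k)]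

-- the two alignment folds agree (and stay nonnegative) on a list of sizes from {1,2,4}
theorem fold_eq (l : List Int) (hl : ∀ s ∈ l, s = 1 ∨ s = 2 ∨ s = 4) :
    ∀ t : Int, 0 ≤ t →
      l.foldl (fun size s => PySem.Int.band (size + s - 1) (-s) + s) t
        = l.foldl (fun total s => total + PySem.Int.mod (-total) s + s) t ∧
      0 ≤ l.foldl (fun total s => total + PySem.Int.mod (-total) s + s) t := by
  induction l with
  | nil => intro t ht; exact ⟨rfl, ht⟩
  | cons s rest ih =>
    intro t ht
    have hs := hl s (by simp)
    have hmn : 0 ≤ PySem.Int.mod (-t) s :=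
      PySem.Int.mod_nonneg (-t) (by rcases hs with rfl | rfl | rfl <;> norm_num)
    have hnn : 0 ≤ t + PySem.Int.mod (-t) s + s := by rcases hs with rfl | rfl | rfl <;> omega
    simp only [List.foldl_cons, band_align t s ht hs]
    exact ih (fun x hx => hl x (by simp [hx])) _ hnn

-- ===== VERDICT (by name: the statement is the Claim_ definition above) =====
theorem get_record_size_spec : Claim_equal_get_record_size := by
  intro records hdom hpre
  obtain ⟨hne, hh, hlenle, hcols⟩ := hpre
  obtain ⟨r0, rest, rfl⟩ : ∃ r0 rest, records = r0 :: rest := by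
    cases records with | nil => exact absurd rfl hne | cons a b => exact ⟨a, b, rfl⟩
  simp only [List.headD_cons] at hh hlenle hcols
  unfold Spec_get_record_size get_record_size get_record_size_alt
  simp only [PySem.List.pyGet?_zero_cons, Option.getD_some]
  have hget : ∀ r ∈ r0 :: rest, ∀ k : Nat, k < r0.length →
      (PySem.List.pyGet? r (k : Int)).getD 0 = r.getD k 0 := by
    intro r hr k hk
    have hkr : k < r.length := lt_of_lt_of_le hk (hlenle r hr)
    simp [PySem.List.pyGet?_natCast, List.getD_eq_getElem?_getD]
  have hcolfact : ∀ k : Nat, k < r0.length →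
      ((match get_type_size ((r0 :: rest).map (fun r => (PySem.List.pyGet? r (k : Int)).getD 0)) with
        | some (_, s) => s | none => 0)
        = colSizeB ((r0 :: rest).map (fun r => (PySem.List.pyGet? r (k : Int)).getD 0))) ∧
      (colSizeB ((r0 :: rest).map (fun r => (PySem.List.pyGet? r (k : Int)).getD 0)) = 1 ∨
       colSizeB ((r0 :: rest).map (fun r => (PySem.List.pyGet? r (k : Int)).getD 0)) = 2 ∨
       colSizeB ((r0 :: rest).map (fun r => (PySem.List.pyGet? r (k : Int)).getD 0)) = 4) := by
    intro k hk
    apply col_size_eq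
    · simp
    · rcases hcols k hk with h | h
      · left; intro x hx
        obtain ⟨r, hr, rfl⟩ := List.mem_map.1 hx
        rw [hget r hr k hk]; exact h r hr
      · right; intro x hx
        obtain ⟨r, hr, rfl⟩ := List.mem_map.1 hx
        rw [hget r hr k hk]; exact h r hr
  have hn0 : 0 < r0.length := by cases r0 with | nil => simp at hh | cons => simp
  obtain ⟨wlen, wget⟩ :=
    widths_spec (r0 :: rest) r0.length (List.replicate r0.length (false, 1, 1)) (by simp)
  have hsizes :
      ((r0 :: rest).foldl
        (fun widths record =>
          (PySem.List.pyRange 0 (r0.length : Int) 1).foldl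
            (fun widths i =>
              PySem.List.pySetD widths i
                (wStep (PySem.List.pyGetD widths i (false, 1, 1)) ((PySem.List.pyGet? record i).getD 0)))
            widths)
        (List.replicate r0.length (false, 1, 1))).map (fun w => if w.1 then w.2.2 else w.2.1)
      = (List.range r0.length).map
          (fun k : Nat => colSizeB ((r0 :: rest).map (fun r => (PySem.List.pyGet? r (k : Int)).getD 0))) := by
    apply List.ext_getElem
    · simp only [List.length_map, List.length_range, wlen]
    · intro k h1 h2
      simp only [List.getElem_map, List.getElem_range]
      have hk : k < r0.length := by
        simpa only [List.length_map, wlen] using h1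
      have hW := wget k hk
      rw [← List.getD_eq_getElem _ (false, (1 : Int), (1 : Int))]
      rw [hW]
      have hrep : (List.replicate r0.length ((false, (1 : Int), (1 : Int)))).getD k (false, 1, 1)
          = (false, (1 : Int), (1 : Int)) := List.getD_replicate _ hk
      rw [hrep]
      rfl
  rw [hsizes]
  have hguard :
      ((List.range r0.length).map
        (fun k : Nat => colSizeB ((r0 :: rest).map (fun r => (PySem.List.pyGet? r (k : Int)).getD 0)))).any
        (fun s => decide (4 < s)) = false := by
    apply List.any_eq_false.mpr
    rintro s hs
    obtain ⟨k, hk, rfl⟩ := List.mem_map.1 hs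
    have hk' := List.mem_range.1 hk
    rcases (hcolfact k hk').2 with h | h | h <;> rw [h] <;> decide
  rw [hguard]
  simp only [Bool.false_eq_true, if_false]
  -- A's index loop as a fold over the same size table
  have hAfold :
      (PySem.List.pyRange 0 (r0.length : Int) 1).foldl
        (fun size i =>
          PySem.Int.band
            (size + (match get_type_size ((r0 :: rest).map (fun record => (PySem.List.pyGet? record i).getD 0)) with
                     | some (_, s) => s | none => 0) - 1)
            (-(match get_type_size ((r0 :: rest).map (fun record => (PySem.List.pyGet? record i).getD 0)) with
               | some (_, s) => s | none => 0)) +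
          (match get_type_size ((r0 :: rest).map (fun record => (PySem.List.pyGet? record i).getD 0)) with
           | some (_, s) => s | none => 0)) 0
      = ((List.range r0.length).map
          (fun k : Nat => colSizeB ((r0 :: rest).map (fun r => (PySem.List.pyGet? r (k : Int)).getD 0)))).foldl
          (fun size s => PySem.Int.band (size + s - 1) (-s) + s) 0 := by
    have h1 :
        (PySem.List.pyRange 0 (r0.length : Int) 1).foldl
          (fun size i =>
            PySem.Int.band
              (size + (match get_type_size ((r0 :: rest).map (fun record => (PySem.List.pyGet? record i).getD 0)) with
                       | some (_, s) => s | none => 0) - 1)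
              (-(match get_type_size ((r0 :: rest).map (fun record => (PySem.List.pyGet? record i).getD 0)) with
                 | some (_, s) => s | none => 0)) +
            (match get_type_size ((r0 :: rest).map (fun record => (PySem.List.pyGet? record i).getD 0)) with
             | some (_, s) => s | none => 0)) 0
        = (PySem.List.pyRange 0 (r0.length : Int) 1).foldl
            (fun size i =>
              PySem.Int.band
                (size + colSizeB ((r0 :: rest).map (fun r => (PySem.List.pyGet? r i).getD 0)) - 1)
                (-colSizeB ((r0 :: rest).map (fun r => (PySem.List.pyGet? r i).getD 0))) +
              colSizeB ((r0 :: rest).map (fun r => (PySem.List.pyGet? r i).getD 0))) 0 := by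
      apply PySem.List.foldl_congr_mem
      intro acc i hi
      obtain ⟨h0i, hin⟩ := PySem.List.mem_pyRange_one.1 hi
      obtain ⟨k, rfl⟩ : ∃ k : Nat, i = (k : Int) := ⟨i.toNat, (Int.toNat_of_nonneg h0i).symm⟩
      have hk : k < r0.length := by exact_mod_cast hin
      rw [(hcolfact k hk).1]
    rw [h1, PySem.List.pyRange_zero_nat, List.foldl_map, List.foldl_map]
  rw [hAfold]
  have hmem : ∀ s ∈ (List.range r0.length).map
      (fun k : Nat => colSizeB ((r0 :: rest).map (fun r => (PySem.List.pyGet? r (k : Int)).getD 0))),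
      s = 1 ∨ s = 2 ∨ s = 4 := by
    simp only [List.mem_map, List.mem_range]
    rintro s ⟨k, hk, rfl⟩
    exact (hcolfact k hk).2
  obtain ⟨hfe, hfnn⟩ := fold_eq _ hmem 0 le_rfl
  rw [hfe]
  -- the final alignment by the first column's size
  have hc0 := hcolfact 0 hn0
  simp only [Nat.cast_zero] at hc0
  have hs0 : PySem.List.pyGetD
      ((List.range r0.length).map
        (fun k : Nat => colSizeB ((r0 :: rest).map (fun r => (PySem.List.pyGet? r (k : Int)).getD 0)))) 0 0
      = colSizeB ((r0 :: rest).map (fun r => (PySem.List.pyGet? r (0 : Int)).getD 0)) := by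
    rw [PySem.List.pyGetD_zero, List.getD_eq_getElem _ _ (by simpa using hn0)]
    simp only [List.getElem_map, List.getElem_range, Nat.cast_zero]
  rw [hs0, hc0.1]
  exact band_align _ _ hfnn hc0.2
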